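-- pv_equiv track=rewrite | github.com/mischaikow/advent_of_code | 2016/13_code.py | is_open_space
-- ===== SOURCE A (Python) =====
-- def is_open_space(x: int, y: int, favorite: int) -> int:
--   encoding = x*x + 3*x + 2*x*y + y + y*y + favorite
--   ans = 0
--   while encoding > 0:
--     if encoding % 2 == 1:
--       encoding -= 1
--       ans += 1
--     encoding >>= 1
--
--   return ans % 2 == 0
-- ===== SOURCE B (Python) =====
-- def is_open_space(x: int, y: int, favorite: int) -> int:
--   # Brian Kernighan popcount: clear the lowest set bit once per set bit,
--   # instead of scanning every bit position.
--   encoding = x*x + 3*x + 2*x*y + y + y*y + favorite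
--   ans = 0
--   while encoding > 0:
--     encoding &= encoding - 1
--     ans += 1
--   return ans % 2 == 0
-- ===== Notes on version B (the rewrite author's own statement) =====
-- stated objective: alternative
-- what changed: Replaced A's bit-by-bit parity-test-and-shift loop over every bit position with Brian Kernighan's loop that clears one set bit per iteration (encoding &= encoding - 1), so the loop runs once per set bit and the inner parity branch disappears.
import Mathlib
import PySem

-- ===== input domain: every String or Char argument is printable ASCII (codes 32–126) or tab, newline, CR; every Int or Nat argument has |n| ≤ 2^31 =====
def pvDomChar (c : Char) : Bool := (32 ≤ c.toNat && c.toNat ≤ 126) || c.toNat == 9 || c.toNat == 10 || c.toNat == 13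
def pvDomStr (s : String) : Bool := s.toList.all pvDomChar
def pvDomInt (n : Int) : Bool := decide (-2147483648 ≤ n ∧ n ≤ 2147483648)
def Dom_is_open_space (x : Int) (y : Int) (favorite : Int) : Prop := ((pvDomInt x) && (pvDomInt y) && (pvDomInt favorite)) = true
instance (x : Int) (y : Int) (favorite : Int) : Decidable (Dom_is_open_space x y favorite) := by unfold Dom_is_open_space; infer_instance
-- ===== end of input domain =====

-- B replaces A's per-bit-position test-and-shift loop with Kernighan's clear-lowest-set-bit
-- loop (one iteration per set bit); same return value, alternative algorithm.

-- ===== PORT A =====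
-- termination helper for the ports' loops (cited in decreasing_by)
theorem pvToNat_shift (m : Nat) : (((m : Int)) >>> 1).toNat = m / 2 := by
  have h : ((m:Int) >>> 1) = ((m >>> 1 : Nat) : Int) := rfl
  rw [h, Int.toNat_natCast, Nat.shiftRight_one]

theorem pvDecA1 (e : Int) (h : 0 < e) : ((e - 1) >>> 1).toNat < e.toNat := by
  have hn : 0 < e.toNat := Int.pos_iff_toNat_pos.mp h
  have he : e - 1 = ((e.toNat - 1 : Nat) : Int) := by
    rw [Int.ofNat_sub hn, Int.toNat_of_nonneg (le_of_lt h), Nat.cast_one]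
  rw [he, pvToNat_shift]
  exact Nat.lt_of_le_of_lt (Nat.div_le_self _ 2) (Nat.sub_lt hn Nat.one_pos)

theorem pvDecA2 (e : Int) (h : 0 < e) : (e >>> 1).toNat < e.toNat := by
  have hn : 0 < e.toNat := Int.pos_iff_toNat_pos.mp h
  have he : e = ((e.toNat : Nat) : Int) := (Int.toNat_of_nonneg (le_of_lt h)).symm
  conv_lhs => rw [he]
  rw [pvToNat_shift]
  exact Nat.div_lt_self hn Nat.one_lt_two

theorem pvDecB (e : Int) (h : 0 < e) : (PySem.Int.band e (e - 1)).toNat < e.toNat := by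
  have h0 : (0:Int) ≤ e := le_of_lt h
  have h1 : (0:Int) ≤ e - 1 := Int.sub_nonneg.mpr h
  rw [PySem.Int.band_of_nonneg h0 h1, Int.toNat_natCast]
  exact Nat.lt_of_le_of_lt Nat.and_le_right ((Int.toNat_lt_toNat h).mpr (sub_one_lt e))

-- A's while loop: test lowest bit, subtract it off and count if set, shift right.
def loopA_is_open_space (encoding : Int) (ans : Int) : Int :=
  if h : 0 < encoding then
    if PySem.Int.mod encoding 2 == 1 then
      loopA_is_open_space ((encoding - 1) >>> 1) (ans + 1)
    else
      loopA_is_open_space (encoding >>> 1) ans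
  else ans
termination_by encoding.toNat
decreasing_by
  · exact pvDecA1 encoding h
  · exact pvDecA2 encoding h

def is_open_space (x : Int) (y : Int) (favorite : Int) : Bool :=
  let encoding := x*x + 3*x + 2*x*y + y + y*y + favorite
  let ans := loopA_is_open_space encoding 0
  PySem.Int.mod ans 2 == 0

-- ===== PORT B =====
-- B's while loop: clear the lowest set bit and count, once per set bit.
def loopB_is_open_space (encoding : Int) (ans : Int) : Int :=
  if h : 0 < encoding then
    loopB_is_open_space (PySem.Int.band encoding (encoding - 1)) (ans + 1)
  else ans
termination_by encoding.toNat
decreasing_by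
  exact pvDecB encoding h

def is_open_space_alt (x : Int) (y : Int) (favorite : Int) : Bool :=
  let encoding := x*x + 3*x + 2*x*y + y + y*y + favorite
  let ans := loopB_is_open_space encoding 0
  PySem.Int.mod ans 2 == 0

-- ===== PRECONDITION & SPEC =====
def Spec_is_open_space (x : Int) (y : Int) (favorite : Int) (out : Bool) : Prop := out = is_open_space_alt x y favorite
instance (x : Int) (y : Int) (favorite : Int) (out : Bool) : Decidable (Spec_is_open_space x y favorite out) := by unfold Spec_is_open_space; infer_instance

-- ===== CLAIM (what is proved, stated in full; the proofs are below) =====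
def Claim_equal_is_open_space : Prop := ∀ (x : Int) (y : Int) (favorite : Int), Dom_is_open_space x y favorite → Spec_is_open_space x y favorite (is_open_space x y favorite)

-- ===== LEMMAS AND PROOFS =====

-- popcount, the quantity both loops add to ans
def pvPc (n : Nat) : Nat :=
  match n with
  | 0 => 0
  | m+1 => (m+1) % 2 + pvPc ((m+1)/2)

theorem pvPc_pos (n : Nat) (h : 0 < n) : pvPc n = n % 2 + pvPc (n / 2) := by
  cases n with
  | zero => omega
  | succ m => conv_lhs => rw [pvPc]

theorem pvPc_two_mul (k : Nat) : pvPc (2 * k) = pvPc k := by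
  cases k with
  | zero => rfl
  | succ m =>
    rw [pvPc_pos _ (by omega)]
    have h1 : 2 * (m+1) % 2 = 0 := by omega
    have h2 : 2 * (m+1) / 2 = m+1 := by omega
    rw [h1, h2]; omega

theorem pvAnd_mod_two (a b : Nat) : (a &&& b) % 2 = (a % 2) &&& (b % 2) := by
  simpa using Nat.and_mod_two_pow (n := 1) (a := a) (b := b)

-- clearing the lowest set bit removes exactly one from the popcount
theorem pvPc_land (n : Nat) (h : 0 < n) : pvPc (n &&& (n - 1)) + 1 = pvPc n := by
  induction n using Nat.strong_induction_on with
  | _ n ih =>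
    have hmod : (n &&& (n-1)) % 2 = (n % 2) &&& ((n-1) % 2) := pvAnd_mod_two n (n-1)
    have hdiv : (n &&& (n-1)) / 2 = (n/2) &&& ((n-1)/2) := Nat.and_div_two
    have hsplit : n &&& (n-1) = 2 * ((n/2) &&& ((n-1)/2)) + ((n % 2) &&& ((n-1) % 2)) := by
      omega
    rcases Nat.even_or_odd n with he | ho
    · -- n even, n > 0 : n &&& (n-1) = 2 * ((n/2) &&& (n/2 - 1))
      have h2 : n % 2 = 0 := Nat.even_iff.mp he
      have hm : (n % 2) &&& ((n-1) % 2) = 0 := by rw [h2, Nat.zero_and]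
      have hd : (n-1)/2 = n/2 - 1 := by omega
      have hx : n &&& (n-1) = 2 * ((n/2) &&& (n/2 - 1)) := by rw [hsplit, hm, hd]; omega
      rw [hx, pvPc_two_mul]
      have hk : 0 < n / 2 := by omega
      rw [ih (n/2) (by omega) hk, pvPc_pos n h, h2]
      omega
    · -- n odd : n &&& (n-1) = n - 1 = 2 * (n/2)
      have h2 : n % 2 = 1 := Nat.odd_iff.mp ho
      have h3 : (n-1) % 2 = 0 := by omega
      have hm : (n % 2) &&& ((n-1) % 2) = 0 := by rw [h2, h3, Nat.and_zero]
      have hd : (n-1)/2 = n/2 := by omega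
      have hx : n &&& (n-1) = 2 * (n/2) := by rw [hsplit, hm, hd, Nat.and_self]; omega
      rw [hx, pvPc_two_mul, pvPc_pos n h, h2]
      omega

-- A's loop computes popcount
theorem loopA_eq (n : Nat) : ∀ ans : Int, loopA_is_open_space (n : Int) ans = (pvPc n : Int) + ans := by
  induction n using Nat.strong_induction_on with
  | _ n ih =>
    intro ans
    rw [loopA_is_open_space]
    cases n with
    | zero => simp [pvPc]
    | succ m =>
      have hpos : (0:Int) < ((m+1 : Nat) : Int) := by exact_mod_cast Nat.succ_pos m
      rw [dif_pos hpos]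
      have hmod : PySem.Int.mod ((m+1:Nat) : Int) 2 = (((m+1) % 2 : Nat) : Int) :=
        PySem.Int.mod_natCast (m+1) 2
      by_cases hodd : (m+1) % 2 = 1
      · rw [if_pos (by rw [hmod, hodd]; decide)]
        have hsub : ((m+1:Nat) : Int) - 1 = (m : Int) := by push_cast; ring
        have hshift : ((m:Int)) >>> 1 = ((m >>> 1 : Nat) : Int) := rfl
        rw [hsub, hshift, ih (m >>> 1) (by rw [Nat.shiftRight_one]; omega)]
        rw [pvPc_pos (m+1) (by omega), hodd]
        have hq : m >>> 1 = (m+1)/2 := by rw [Nat.shiftRight_one]; omega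
        rw [hq]; push_cast; ring
      · have h0 : (m+1) % 2 = 0 := by omega
        rw [if_neg (by rw [hmod, h0]; decide)]
        have hshift : (((m+1:Nat)):Int) >>> 1 = (((m+1) >>> 1 : Nat) : Int) := rfl
        rw [hshift, ih ((m+1) >>> 1) (by rw [Nat.shiftRight_one]; omega)]
        rw [pvPc_pos (m+1) (by omega), h0]
        rw [Nat.shiftRight_one]
        push_cast; ring

-- B's loop computes popcount
theorem loopB_eq (n : Nat) : ∀ ans : Int, loopB_is_open_space (n : Int) ans = (pvPc n : Int) + ans := by
  induction n using Nat.strong_induction_on with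
  | _ n ih =>
    intro ans
    rw [loopB_is_open_space]
    cases Nat.eq_zero_or_pos n with
    | inl h0 => subst h0; simp [pvPc]
    | inr hpos =>
      have hp : (0:Int) < (n : Int) := by exact_mod_cast hpos
      rw [dif_pos hp]
      have hsub : ((n:Nat) : Int) - 1 = ((n - 1 : Nat) : Int) := by omega
      rw [hsub, PySem.Int.band_natCast n (n-1), ih (n &&& (n-1))
        (by have := Nat.and_le_right (n := n) (m := n - 1); omega)]
      have := pvPc_land n hpos
      omega

theorem loop_eq (e : Int) : loopA_is_open_space e 0 = loopB_is_open_space e 0 := by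
  by_cases hle : e ≤ 0
  · rw [loopA_is_open_space, loopB_is_open_space, dif_neg (by omega), dif_neg (by omega)]
  · have he : e = ((e.toNat : Nat) : Int) := by omega
    rw [he, loopA_eq, loopB_eq]

-- ===== VERDICT (by name: the statement is the Claim_ definition above) =====
theorem is_open_space_spec : Claim_equal_is_open_space := by
  intro x y favorite _
  unfold Spec_is_open_space is_open_space is_open_space_alt
  simp only [loop_eq]
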